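-- pv_equiv track=rewrite | github.com/preston-brown/advent-2025 | day08/solution2.py | get_closest_pair_iterator
-- ===== SOURCE A (Python) =====
-- import heapq
--
-- def get_closest_pair_iterator(junction_boxes):
--     """
--     Iterate over pairs of junction boxes in order by increasing distance between them.
--     """
--     heap = []
--     for jb1 in junction_boxes:
--         for jb2 in junction_boxes:
--             if jb1 < jb2:
--                 distance_squared = sum([(x - y) ** 2 for x, y in zip(jb1, jb2)])
--                 heapq.heappush(heap, (distance_squared, jb1, jb2))
--     while heap:
--         _, jb1, jb2 = heapq.heappop(heap)
--         yield jb1, jb2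
-- ===== SOURCE B (Python) =====
-- def get_closest_pair_iterator(junction_boxes):
--     """
--     Iterate over pairs of junction boxes in order by increasing distance between them.
--     Builds a plain list and sorts it once instead of using a heap.
--     """
--     pairs = []
--     for jb1 in junction_boxes:
--         for jb2 in junction_boxes:
--             if jb1 < jb2:
--                 distance_squared = sum([(x - y) ** 2 for x, y in zip(jb1, jb2)])
--                 pairs.append((distance_squared, jb1, jb2))
--     pairs.sort()
--     for _, jb1, jb2 in pairs:
--         yield jb1, jb2
-- ===== Notes on version B (the rewrite author's own statement) =====
-- stated objective: simpler
-- what changed: B replaces the heap (heappush every pair, then drain the heap one pop at a time) with a plain list of (distance_squared, jb1, jb2) tuples sorted once by list.sort(); ties resolve identically because tuple comparison is a total order.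
import Mathlib
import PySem

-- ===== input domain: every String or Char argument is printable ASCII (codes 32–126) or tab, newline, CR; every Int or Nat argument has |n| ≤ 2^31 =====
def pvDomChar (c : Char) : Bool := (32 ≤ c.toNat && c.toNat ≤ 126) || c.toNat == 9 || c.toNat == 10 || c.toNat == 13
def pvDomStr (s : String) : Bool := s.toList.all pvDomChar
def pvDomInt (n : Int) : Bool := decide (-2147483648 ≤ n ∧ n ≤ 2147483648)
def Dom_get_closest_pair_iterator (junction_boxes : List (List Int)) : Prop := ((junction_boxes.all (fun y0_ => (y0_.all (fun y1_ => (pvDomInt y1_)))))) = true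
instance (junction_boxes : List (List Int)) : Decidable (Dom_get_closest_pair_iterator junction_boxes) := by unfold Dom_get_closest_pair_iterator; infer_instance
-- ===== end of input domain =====

-- B replaces A's heap (heappush every pair, then pop one at a time) by a plain list
-- sorted once; same output, no speed claim (objective: simpler).

-- ===== PORT A =====
-- Python compares the tuples (distance_squared, jb1, jb2) lexicographically, the
-- components jb1/jb2 themselves lexicographically; Lean's `<` on List Int is that same
-- lexicographic order, so Python's tuple `<` is exactly `<` under the key pvKey.
def pvKey (v : Int × List Int × List Int) : Lex (Int × Lex (List Int × List Int)) :=
  toLex (v.1, toLex (v.2.1, v.2.2))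

def pvLt (a b : Int × List Int × List Int) : Bool := decide (pvKey a < pvKey b)

-- heapq.heappush / heappop are stdlib calls; they are ported as a verified min-priority
-- queue (skew heap) over the same Python comparison pvLt.  The popped sequence is exact
-- w.r.t. CPython's binary heap: the comparison is a total order, so any min-priority
-- queue pops the same multiset in the same nondecreasing order, ties being equal tuples.
inductive PVHeap
  | nil
  | node : (Int × List Int × List Int) → PVHeap → PVHeap → PVHeap
deriving DecidableEq, Repr

def pvSize : PVHeap → Nat
  | .nil => 0
  | .node _ l r => pvSize l + pvSize r + 1

def pvMerge : PVHeap → PVHeap → PVHeap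
  | .nil, h => h
  | h, .nil => h
  | .node a l1 r1, .node b l2 r2 =>
    if pvLt b a then .node b (pvMerge (.node a l1 r1) r2) l2
    else .node a (pvMerge r1 (.node b l2 r2)) l1
termination_by h1 h2 => pvSize h1 + pvSize h2
decreasing_by all_goals (simp [pvSize]; try omega)

def pvPush (h : PVHeap) (x : Int × List Int × List Int) : PVHeap :=
  pvMerge h (.node x .nil .nil)

-- the `while heap:` pop loop, totalized with a structural fuel = heap size (the loop
-- pops exactly pvSize h times); the fuel is a totalization guard, not an algorithm switch
def pvDrainFuel : Nat → PVHeap → List (Int × List Int × List Int)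
  | 0, _ => []
  | _ + 1, .nil => []
  | n + 1, .node v l r => v :: pvDrainFuel n (pvMerge l r)

def pvDrain (h : PVHeap) : List (Int × List Int × List Int) := pvDrainFuel (pvSize h) h

def get_closest_pair_iterator (junction_boxes : List (List Int)) : List (List Int × List Int) :=
  let heap := junction_boxes.foldl (fun h jb1 =>
    junction_boxes.foldl (fun h jb2 =>
      if jb1 < jb2 then
        pvPush h ((((jb1.zip jb2).map (fun p => (p.1 - p.2) ^ 2)).sum, jb1, jb2))
      else h) h) PVHeap.nil
  (pvDrain heap).map (fun v => (v.2.1, v.2.2))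

-- ===== PORT B =====
-- pairs.sort() sorts the tuple list by Python's tuple order, which is `<` on pvKey
-- (an injective key, so stability cannot matter); ported as PySem.List.sorted.
def get_closest_pair_iterator_alt (junction_boxes : List (List Int)) : List (List Int × List Int) :=
  let pairs := junction_boxes.foldl (fun acc jb1 =>
    junction_boxes.foldl (fun acc jb2 =>
      if jb1 < jb2 then
        acc ++ [(((jb1.zip jb2).map (fun p => (p.1 - p.2) ^ 2)).sum, jb1, jb2)]
      else acc) acc) []
  (PySem.List.sorted pairs pvKey).map (fun v => (v.2.1, v.2.2))

-- ===== PRECONDITION & SPEC =====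
def Spec_get_closest_pair_iterator (junction_boxes : List (List Int)) (out : List (List Int × List Int)) : Prop := out = get_closest_pair_iterator_alt junction_boxes
instance (junction_boxes : List (List Int)) (out : List (List Int × List Int)) : Decidable (Spec_get_closest_pair_iterator junction_boxes out) := by unfold Spec_get_closest_pair_iterator; infer_instance

-- ===== CLAIM (what is proved, stated in full; the proofs are below) =====
def Claim_equal_get_closest_pair_iterator : Prop := ∀ (junction_boxes : List (List Int)), Dom_get_closest_pair_iterator junction_boxes → Spec_get_closest_pair_iterator junction_boxes (get_closest_pair_iterator junction_boxes)

-- ===== LEMMAS AND PROOFS =====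

theorem pvKey_inj {a b : Int × List Int × List Int} (h : pvKey a = pvKey b) : a = b := by
  simp only [pvKey, toLex_inj, Prod.ext_iff] at h
  exact Prod.ext h.1 (Prod.ext h.2.1 h.2.2)

def pvElems : PVHeap → List (Int × List Int × List Int)
  | .nil => []
  | .node v l r => v :: (pvElems l ++ pvElems r)

def PVOrdered : PVHeap → Prop
  | .nil => True
  | .node v l r =>
      (∀ y ∈ pvElems l ++ pvElems r, pvKey v ≤ pvKey y) ∧ PVOrdered l ∧ PVOrdered r

theorem pvElems_merge (h1 h2 : PVHeap) :
    (pvElems (pvMerge h1 h2)).Perm (pvElems h1 ++ pvElems h2) := by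
  induction h1, h2 using pvMerge.induct with
  | case1 h => simp [pvMerge, pvElems]
  | case2 h => cases h <;> simp [pvMerge, pvElems]
  | case3 a l1 r1 b l2 r2 hlt ih =>
      simp only [pvMerge, hlt, if_true, pvElems] at ih ⊢
      refine (List.Perm.cons b ?_).trans (List.perm_middle).symm
      refine (ih.append_right (pvElems l2)).trans ?_
      rw [List.append_assoc]
      exact (List.perm_append_comm).append_left _
  | case4 a l1 r1 b l2 r2 hlt ih =>
      simp only [pvMerge, hlt, pvElems] at ih ⊢
      simp only [List.cons_append]
      refine List.Perm.cons a ?_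
      refine (ih.append_right (pvElems l1)).trans ?_
      refine (List.perm_append_comm).trans ?_
      rw [← List.append_assoc]

theorem pvOrdered_merge (h1 h2 : PVHeap) :
    PVOrdered h1 → PVOrdered h2 → PVOrdered (pvMerge h1 h2) := by
  induction h1, h2 using pvMerge.induct with
  | case1 h => intro _ o2; simpa [pvMerge] using o2
  | case2 h => intro o1 _; cases h <;> simpa [pvMerge] using o1
  | case3 a l1 r1 b l2 r2 hlt ih =>
      intro o1 o2
      obtain ⟨hb, ol2, or2⟩ := o2
      have hba : pvKey b < pvKey a := by simpa [pvLt] using hlt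
      simp only [pvMerge, hlt, if_true, PVOrdered]
      refine ⟨?_, ih o1 or2, ol2⟩
      intro y hy
      rcases List.mem_append.1 hy with hy | hy
      · have hy' := (pvElems_merge (.node a l1 r1) r2).mem_iff.1 hy
        rcases List.mem_append.1 hy' with hy'' | hy''
        · simp only [pvElems, List.mem_cons] at hy''
          rcases hy'' with rfl | hy''
          · exact le_of_lt hba
          · exact le_of_lt (lt_of_lt_of_le hba (o1.1 y hy''))
        · exact hb y (List.mem_append.2 (Or.inr hy''))
      · exact hb y (List.mem_append.2 (Or.inl hy))
  | case4 a l1 r1 b l2 r2 hlt ih =>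
      intro o1 o2
      obtain ⟨ha, ol1, or1⟩ := o1
      have hab : pvKey a ≤ pvKey b := by
        have : ¬ pvKey b < pvKey a := by simpa [pvLt] using hlt
        exact le_of_not_gt this
      simp only [pvMerge, hlt]
      refine ⟨?_, ih or1 o2, ol1⟩
      intro y hy
      rcases List.mem_append.1 hy with hy | hy
      · have hy' := (pvElems_merge r1 (.node b l2 r2)).mem_iff.1 hy
        rcases List.mem_append.1 hy' with hy'' | hy''
        · exact ha y (List.mem_append.2 (Or.inr hy''))
        · simp only [pvElems, List.mem_cons] at hy''
          rcases hy'' with rfl | hy''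
          · exact hab
          · exact le_trans hab (o2.1 y hy'')
      · exact ha y (List.mem_append.2 (Or.inl hy))

theorem pvSize_merge (h1 h2 : PVHeap) : pvSize (pvMerge h1 h2) = pvSize h1 + pvSize h2 := by
  induction h1, h2 using pvMerge.induct with
  | case1 h => simp [pvMerge, pvSize]
  | case2 h => cases h <;> simp [pvMerge, pvSize]
  | case3 a l1 r1 b l2 r2 hlt ih => simp [pvMerge, hlt, ih, pvSize]; omega
  | case4 a l1 r1 b l2 r2 hlt ih => simp [pvMerge, hlt, ih, pvSize]; omega

theorem pvDrainFuel_perm_pairwise :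
    ∀ (n : Nat) (h : PVHeap), PVOrdered h → pvSize h ≤ n →
    (pvDrainFuel n h).Perm (pvElems h) ∧
      (pvDrainFuel n h).Pairwise (fun x y => pvKey x ≤ pvKey y) := by
  intro n
  induction n with
  | zero =>
      intro h _ hle
      cases h with
      | nil => simp [pvDrainFuel, pvElems]
      | node v l r => simp [pvSize] at hle
  | succ n ih =>
      intro h o hle
      cases h with
      | nil => simp [pvDrainFuel, pvElems]
      | node v l r =>
          obtain ⟨hb, ol, or⟩ := o
          have hsz : pvSize (pvMerge l r) ≤ n := by
            rw [pvSize_merge]; simp [pvSize] at hle; omega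
          obtain ⟨ihp, ihs⟩ := ih (pvMerge l r) (pvOrdered_merge l r ol or) hsz
          have hperm : (pvDrainFuel n (pvMerge l r)).Perm (pvElems l ++ pvElems r) :=
            ihp.trans (pvElems_merge l r)
          constructor
          · simpa [pvDrainFuel, pvElems] using List.Perm.cons v hperm
          · simp only [pvDrainFuel]
            refine List.pairwise_cons.2 ⟨?_, ihs⟩
            intro y hy
            exact hb y (hperm.mem_iff.1 hy)

theorem pvDrain_perm_pairwise (h : PVHeap) (o : PVOrdered h) :
    (pvDrain h).Perm (pvElems h) ∧ (pvDrain h).Pairwise (fun x y => pvKey x ≤ pvKey y) :=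
  pvDrainFuel_perm_pairwise (pvSize h) h o (le_refl _)

theorem pvOrdered_push (h : PVHeap) (x : Int × List Int × List Int) (o : PVOrdered h) :
    PVOrdered (pvPush h x) ∧ (pvElems (pvPush h x)).Perm (pvElems h ++ [x]) := by
  constructor
  · exact pvOrdered_merge h (.node x .nil .nil) o (by simp [PVOrdered, pvElems])
  · simpa [pvElems] using pvElems_merge h (.node x .nil .nil)

theorem pv_inner (jb1 : List Int) (jb2s : List (List Int)) :
    ∀ (h : PVHeap) (acc : List (Int × List Int × List Int)),
      PVOrdered h → (pvElems h).Perm acc →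
      PVOrdered (jb2s.foldl (fun h jb2 =>
          if jb1 < jb2 then
            pvPush h ((((jb1.zip jb2).map (fun p => (p.1 - p.2) ^ 2)).sum, jb1, jb2))
          else h) h) ∧
      (pvElems (jb2s.foldl (fun h jb2 =>
          if jb1 < jb2 then
            pvPush h ((((jb1.zip jb2).map (fun p => (p.1 - p.2) ^ 2)).sum, jb1, jb2))
          else h) h)).Perm
        (jb2s.foldl (fun acc jb2 =>
          if jb1 < jb2 then
            acc ++ [(((jb1.zip jb2).map (fun p => (p.1 - p.2) ^ 2)).sum, jb1, jb2)]
          else acc) acc) := by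
  induction jb2s with
  | nil => intro h acc o hp; exact ⟨o, hp⟩
  | cons jb2 rest ih =>
      intro h acc o hp
      simp only [List.foldl_cons]
      by_cases hc : jb1 < jb2
      · simp only [if_pos hc]
        obtain ⟨o', hp'⟩ := pvOrdered_push h _ o
        exact ih _ _ o' (hp'.trans (hp.append_right _))
      · simp only [if_neg hc]
        exact ih h acc o hp

theorem pv_outer (jbs : List (List Int)) (jb1s : List (List Int)) :
    ∀ (h : PVHeap) (acc : List (Int × List Int × List Int)),
      PVOrdered h → (pvElems h).Perm acc →
      PVOrdered (jb1s.foldl (fun h jb1 =>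
        jbs.foldl (fun h jb2 =>
          if jb1 < jb2 then
            pvPush h ((((jb1.zip jb2).map (fun p => (p.1 - p.2) ^ 2)).sum, jb1, jb2))
          else h) h) h) ∧
      (pvElems (jb1s.foldl (fun h jb1 =>
        jbs.foldl (fun h jb2 =>
          if jb1 < jb2 then
            pvPush h ((((jb1.zip jb2).map (fun p => (p.1 - p.2) ^ 2)).sum, jb1, jb2))
          else h) h) h)).Perm
      (jb1s.foldl (fun acc jb1 =>
        jbs.foldl (fun acc jb2 =>
          if jb1 < jb2 then
            acc ++ [(((jb1.zip jb2).map (fun p => (p.1 - p.2) ^ 2)).sum, jb1, jb2)]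
          else acc) acc) acc) := by
  induction jb1s with
  | nil => intro h acc o hp; exact ⟨o, hp⟩
  | cons jb1 rest ih =>
      intro h acc o hp
      simp only [List.foldl_cons]
      obtain ⟨o', hp'⟩ := pv_inner jb1 jbs h acc o hp
      exact ih _ _ o' hp'

-- ===== VERDICT (by name: the statement is the Claim_ definition above) =====
theorem get_closest_pair_iterator_spec : Claim_equal_get_closest_pair_iterator := by
  intro jbs _
  unfold Spec_get_closest_pair_iterator
  unfold get_closest_pair_iterator get_closest_pair_iterator_alt
  obtain ⟨oH, hHp⟩ := pv_outer jbs jbs PVHeap.nil [] trivial (by simp [pvElems])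
  obtain ⟨hdp, hds⟩ := pvDrain_perm_pairwise _ oH
  set H := jbs.foldl (fun h jb1 =>
    jbs.foldl (fun h jb2 =>
      if jb1 < jb2 then
        pvPush h ((((jb1.zip jb2).map (fun p => (p.1 - p.2) ^ 2)).sum, jb1, jb2))
      else h) h) PVHeap.nil with hHdef
  set pairs := jbs.foldl (fun acc jb1 =>
    jbs.foldl (fun acc jb2 =>
      if jb1 < jb2 then
        acc ++ [(((jb1.zip jb2).map (fun p => (p.1 - p.2) ^ 2)).sum, jb1, jb2)]
      else acc) acc) [] with hPdef
  have hsortp : (PySem.List.sorted pairs pvKey).Perm pairs := PySem.List.sorted_perm pairs pvKey false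
  have hsorts : (PySem.List.sorted pairs pvKey).Pairwise (fun a b => pvKey a ≤ pvKey b) :=
    PySem.List.sorted_pairwise pairs pvKey
  have hperm : (pvDrain H).Perm (PySem.List.sorted pairs pvKey) :=
    (hdp.trans hHp).trans hsortp.symm
  have heq : pvDrain H = PySem.List.sorted pairs pvKey :=
    List.Perm.eq_of_pairwise
      (fun a b _ _ h1 h2 => pvKey_inj (le_antisymm h1 h2)) hds hsorts hperm
  simp only [heq]
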